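-- pv_equiv track=rewrite | github.com/Semih1997/CodingBat-Java-Problems-in-Python | Codingbat String-2/plusOutSBK.py | plusout1
-- ===== SOURCE A (Python) =====
-- def plusout1(a, b):
--     new_a = ""
--     i = 0
--     while i < len(a):
--         if a[i:i+len(b)] == b:
--             new_a += b
--             i += len(b)
--         else:
--             new_a += '+'
--             i += 1
--     return new_a
-- ===== SOURCE B (Python) =====
-- def plusout1(a, b):
--     return b.join('+' * len(p) for p in a.split(b))
-- ===== Notes on version B (the rewrite author's own statement) =====
-- stated objective: idiomatic
-- what changed: Replaced the explicit index-stepping while-loop over a with a one-line split/map/join pipeline: a.split(b) finds the same greedy non-overlapping occurrences of b, each piece is mapped to '+'*len(piece), and the pieces are rejoined with b.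
-- outside the precondition, e.g. on plusout1('', ''): A returns '', B raises ValueError
import Mathlib
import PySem

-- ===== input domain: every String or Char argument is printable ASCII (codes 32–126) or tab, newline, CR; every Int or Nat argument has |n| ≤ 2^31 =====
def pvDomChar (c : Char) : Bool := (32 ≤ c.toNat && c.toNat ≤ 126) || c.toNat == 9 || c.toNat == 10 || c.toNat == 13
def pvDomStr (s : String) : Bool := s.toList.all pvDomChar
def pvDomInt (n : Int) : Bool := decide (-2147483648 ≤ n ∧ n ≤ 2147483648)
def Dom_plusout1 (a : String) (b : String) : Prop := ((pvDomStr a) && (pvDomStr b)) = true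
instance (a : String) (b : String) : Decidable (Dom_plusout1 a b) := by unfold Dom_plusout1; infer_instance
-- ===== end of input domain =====

-- B replaces A's index-stepping scan with a split/map/join pipeline (idiomatic; same cost).

-- ===== PORT A =====
-- A's while-loop over index i, written as the equivalent structural recursion on the
-- suffix a[i:]: the True branch compares a[i:i+len(b)] with b and advances by len(b),
-- the False branch emits '+' and advances by 1. (For b = "" Python's loop never
-- terminates when a ≠ ""; b = "" lies outside Pre_ below.)
def plusout1Loop (rem : List Char) (bs : List Char) : List Char :=
  match rem with
  | [] => []
  | c :: rest =>
    if List.take bs.length rem = bs then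
      bs ++ plusout1Loop (List.drop (bs.length - 1) rest) bs
    else
      '+' :: plusout1Loop rest bs
termination_by rem.length
decreasing_by
  all_goals simp

def plusout1 (a : String) (b : String) : String :=
  String.ofList (plusout1Loop a.toList b.toList)

-- ===== PORT B =====
-- b.join('+' * len(p) for p in a.split(b))
def plusout1_alt (a : String) (b : String) : String :=
  String.ofList (PySem.Chars.join b.toList
    ((PySem.Chars.splitOn a.toList b.toList).map
      (fun p => List.replicate p.length '+')))

-- ===== PRECONDITION & SPEC =====
-- Pre_ excludes b = "": there Python A either loops forever (a ≠ "") or returns ""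
-- (a = ""), while B's a.split(b) raises ValueError ('empty separator') in both cases.
def Pre_plusout1 (a : String) (b : String) : Prop := b ≠ ""
instance (a : String) (b : String) : Decidable (Pre_plusout1 a b) := by unfold Pre_plusout1; infer_instance
def pvWitness_plusout1 : String × String := ("abxyab", "ab")

def Spec_plusout1 (a : String) (b : String) (out : String) : Prop := out = plusout1_alt a b
instance (a : String) (b : String) (out : String) : Decidable (Spec_plusout1 a b out) := by unfold Spec_plusout1; infer_instance

-- ===== CLAIM (what is proved, stated in full; the proofs are below) =====
def Claim_equal_plusout1 : Prop := ∀ (a : String) (b : String), Dom_plusout1 a b → Pre_plusout1 a b → Spec_plusout1 a b (plusout1 a b)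

-- ===== LEMMAS AND PROOFS =====

-- abbreviation used only in the proofs
def pvPlus (p : List Char) : List Char := List.replicate p.length '+'

theorem plusout1Loop_cons (c : Char) (rest bs : List Char) :
    plusout1Loop (c :: rest) bs =
      if List.take bs.length (c :: rest) = bs then
        bs ++ plusout1Loop (List.drop (bs.length - 1) rest) bs
      else
        '+' :: plusout1Loop rest bs := by
  rw [plusout1Loop]

theorem pvJoin_append_singleton (bs : List Char) (xs : List (List Char)) (y : List Char) :
    PySem.Chars.join bs (xs ++ [y]) =
      PySem.Chars.join bs xs ++ (if xs = [] then [] else bs) ++ y := by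
  induction xs with
  | nil => simp [PySem.Chars.join, List.intercalate]
  | cons x xs ih =>
    cases xs with
    | nil => simp [PySem.Chars.join, List.intercalate]
    | cons z zs =>
      simp only [List.cons_append, PySem.Chars.join_cons_cons] at *
      simp [ih]

-- A's slice test a[i:i+len(b)] == b equals the isPrefixOf test inside splitOn.go
theorem pvTake_eq_iff_isPrefixOf (bs l : List Char) :
    (List.take bs.length l = bs) ↔ bs.isPrefixOf l = true := by
  rw [List.isPrefixOf_iff_prefix, List.prefix_iff_eq_take]
  exact eq_comm

-- main invariant: a run of splitOn.go from state (l, cur, acc), joined through pvPlus,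
-- is the already-emitted part followed by A's loop on the remaining suffix l
theorem pvGo_loop (bs : List Char) (hb : bs ≠ []) :
    ∀ (fuel : Nat) (l cur : List Char) (acc : List (List Char)) (_ : l.length < fuel),
      PySem.Chars.join bs ((PySem.Chars.splitOn.go bs fuel l cur acc).map pvPlus) =
        PySem.Chars.join bs (acc.reverse.map pvPlus) ++
          (if acc = [] then [] else bs) ++
          List.replicate cur.length '+' ++ plusout1Loop l bs := by
  have hb1 : 0 < bs.length := List.length_pos_of_ne_nil hb
  intro fuel
  induction fuel with
  | zero => intro l cur acc h; omega
  | succ fuel ih =>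
    intro l cur acc h
    cases l with
    | nil =>
      rw [show PySem.Chars.splitOn.go bs (fuel+1) [] cur acc = (cur.reverse :: acc).reverse
            from rfl]
      by_cases ha : acc = []
      · subst ha; simp [pvPlus, plusout1Loop]
      · simp [pvJoin_append_singleton, pvPlus, plusout1Loop, ha]
    | cons c rest =>
      by_cases hp : bs.isPrefixOf (c :: rest) = true
      · rw [show PySem.Chars.splitOn.go bs (fuel+1) (c :: rest) cur acc =
              PySem.Chars.splitOn.go bs fuel (List.drop bs.length (c :: rest)) []
                (cur.reverse :: acc) from by
            simp [PySem.Chars.splitOn.go, hp]]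
        rw [ih _ _ _ (by simp at h ⊢; omega)]
        rw [plusout1Loop_cons, if_pos ((pvTake_eq_iff_isPrefixOf bs (c :: rest)).mpr hp)]
        have hd : List.drop bs.length (c :: rest) = List.drop (bs.length - 1) rest := by
          cases bs with
          | nil => exact absurd rfl hb
          | cons x xs => simp
        rw [hd]
        by_cases ha : acc = []
        · subst ha; simp [pvPlus]
        · simp [pvJoin_append_singleton, pvPlus, ha]
      · rw [show PySem.Chars.splitOn.go bs (fuel+1) (c :: rest) cur acc =
              PySem.Chars.splitOn.go bs fuel rest (c :: cur) acc from by
            simp [PySem.Chars.splitOn.go, hp]]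
        rw [ih _ _ _ (by simp at h ⊢; omega)]
        rw [plusout1Loop_cons,
            if_neg (fun hc => hp ((pvTake_eq_iff_isPrefixOf bs (c :: rest)).mp hc))]
        simp [List.replicate_succ']

theorem pvLoop_eq_split (s bs : List Char) (hb : bs ≠ []) :
    plusout1Loop s bs =
      PySem.Chars.join bs ((PySem.Chars.splitOn s bs).map
        (fun p => List.replicate p.length '+')) := by
  have hmain := pvGo_loop bs hb (s.length + 1) s [] [] (by omega)
  rw [PySem.Chars.splitOn]
  have hm : (fun p : List Char => List.replicate p.length '+') = pvPlus := rfl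
  rw [hm, hmain]
  simp [PySem.Chars.join, List.intercalate]

-- ===== VERDICT (by name: the statement is the Claim_ definition above) =====
theorem plusout1_spec : Claim_equal_plusout1 := by
  intro a b _ hpre
  unfold Spec_plusout1 plusout1 plusout1_alt
  congr 1
  apply pvLoop_eq_split
  intro h
  apply hpre
  have := congrArg String.ofList h
  simpa using this
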